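-- pv_equiv track=rewrite | github.com/rmsandu/2D-multiview-generation | src/dataset_builder.py | choose_four_views
-- ===== SOURCE A (Python) =====
-- def choose_four_views(img_paths):
--     """Pick indices 0, 1/4, 1/2, last one through the sweep."""
--     paths = sorted(img_paths)
--     n = len(paths)
--     idx = [0, n // 4, n // 2, n - 2]
--     idx = [min(i, n - 1) for i in idx]
--     picks = [paths[i] for i in idx]
--     while len(picks) < 4:  # handle <4 frames edge-case
--         picks.append(picks[-1])
--     return picks
-- ===== SOURCE B (Python) =====
-- def _kth(xs, k):
--     """k-th smallest element of xs (0-based) by three-way quickselect."""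
--     pivot = xs[0]
--     less = [x for x in xs if x < pivot]
--     if k < len(less):
--         return _kth(less, k)
--     greater = [x for x in xs if x > pivot]
--     n_le = len(xs) - len(greater)
--     if k < n_le:
--         return pivot
--     return _kth(greater, k - n_le)
--
--
-- def choose_four_views(img_paths):
--     n = len(img_paths)
--     return [_kth(img_paths, max(0, min(i, n - 1))) for i in (0, n // 4, n // 2, n - 2)]
-- ===== Notes on version B (the rewrite author's own statement) =====
-- stated objective: alternative
-- what changed: B never sorts: each of the four picks is the needed order statistic computed directly by a three-way quickselect, replacing A's full sort + clamped index list + padding while-loop; Pre_ excludes only the empty list, on which A raises IndexError (paths[-1]).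
import Mathlib
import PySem

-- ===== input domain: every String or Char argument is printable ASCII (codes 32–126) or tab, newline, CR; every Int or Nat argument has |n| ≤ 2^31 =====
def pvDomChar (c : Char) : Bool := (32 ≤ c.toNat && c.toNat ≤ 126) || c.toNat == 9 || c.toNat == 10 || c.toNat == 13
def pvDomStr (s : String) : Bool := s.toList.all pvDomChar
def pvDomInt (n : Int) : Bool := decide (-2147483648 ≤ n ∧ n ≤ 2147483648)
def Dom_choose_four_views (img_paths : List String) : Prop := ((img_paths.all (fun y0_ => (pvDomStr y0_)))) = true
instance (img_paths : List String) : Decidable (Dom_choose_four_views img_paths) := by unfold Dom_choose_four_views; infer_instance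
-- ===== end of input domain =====

-- B replaces A's full sort + clamped index list + padding while-loop with a direct
-- three-way quickselect for each of the four order statistics (objective: alternative).


-- ===== PORT A =====
-- while len(picks) < 4: picks.append(picks[-1])  — fuel 4 suffices (one element per pass, start length 4)
def pvPadA (picks : List String) : Nat → List String
  | 0 => picks
  | fuel + 1 =>
      if picks.length < 4 then
        pvPadA (picks ++ [PySem.List.pyGetD picks (-1) ""]) fuel
      else picks

def choose_four_views (img_paths : List String) : List String :=
  let paths := PySem.List.sorted img_paths (fun x => x) false
  let n : Int := PySem.List.len paths
  let idx : List Int := [0, PySem.Int.floordiv n 4, PySem.Int.floordiv n 2, n - 2]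
  let idx2 := idx.map (fun i => min i (n - 1))
  let picks := idx2.map (fun i => PySem.List.pyGetD paths i "")
  pvPadA picks 4

-- ===== PORT B =====
-- Source B's _kth: three-way quickselect with pivot = xs[0].
-- On [] Python raises IndexError (xs[0]); that branch returns "" and is unreachable under Pre_.
def pvKth (xs : List String) (k : Int) : String :=
  match xs with
  | [] => ""
  | p :: rest =>
      let less := (p :: rest).filter (fun x => decide (x < p))
      if k < (less.length : Int) then pvKth less k
      else
        let greater := (p :: rest).filter (fun x => decide (p < x))
        let n_le : Int := (p :: rest).length - greater.length
        if k < n_le then p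
        else pvKth greater (k - n_le)
termination_by xs.length
decreasing_by
  · simpa using Nat.lt_succ_of_le (List.length_filter_le _ rest)
  · simpa using Nat.lt_succ_of_le (List.length_filter_le _ rest)

def choose_four_views_alt (img_paths : List String) : List String :=
  let n : Int := PySem.List.len img_paths
  [0, PySem.Int.floordiv n 4, PySem.Int.floordiv n 2, n - 2].map
    (fun i => pvKth img_paths (max 0 (min i (n - 1))))

-- ===== PRECONDITION & SPEC =====
-- A raises IndexError on the empty list (paths[-1] on []); Pre_ excludes exactly that input.
def Pre_choose_four_views (img_paths : List String) : Prop := img_paths ≠ []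
instance (img_paths : List String) : Decidable (Pre_choose_four_views img_paths) := by
  unfold Pre_choose_four_views; infer_instance
def pvWitness_choose_four_views : List String := (["b", "a"])

def Spec_choose_four_views (img_paths : List String) (out : List String) : Prop := out = choose_four_views_alt img_paths
instance (img_paths : List String) (out : List String) : Decidable (Spec_choose_four_views img_paths out) := by unfold Spec_choose_four_views; infer_instance

-- ===== CLAIM (what is proved, stated in full; the proofs are below) =====
def Claim_equal_choose_four_views : Prop := ∀ (img_paths : List String), Dom_choose_four_views img_paths → Pre_choose_four_views img_paths → Spec_choose_four_views img_paths (choose_four_views img_paths)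



-- ===== LEMMAS AND PROOFS =====

-- the three filters by comparison with a pivot are a permutation of the list
theorem pv_tri_perm (xs : List String) (p : String) :
    (xs.filter (fun x => decide (x < p)) ++ xs.filter (fun x => x == p) ++
      xs.filter (fun x => decide (p < x))).Perm xs := by
  have h1 := List.filter_append_perm (fun x => decide (x < p)) xs
  have h2 := List.filter_append_perm (fun x => x == p) (xs.filter (fun x => !decide (x < p)))
  rw [List.filter_filter, List.filter_filter] at h2
  have e1 : xs.filter (fun a => (a == p) && !decide (a < p)) = xs.filter (fun x => x == p) := by
    apply List.filter_congr; intro x _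
    by_cases hx : x = p
    · subst hx; simp
    · simp [hx]
  have e2 : xs.filter (fun a => (!(a == p)) && !decide (a < p)) = xs.filter (fun x => decide (p < x)) := by
    apply List.filter_congr; intro x _
    rcases lt_trichotomy x p with h | h | h
    · simp [h, not_lt_of_gt h]
    · subst h; simp
    · simp [h, (ne_of_gt h), not_lt_of_gt h]
  rw [e1, e2] at h2
  rw [List.append_assoc]
  exact (h2.append_left (xs.filter (fun x => decide (x < p)))).trans h1

-- main lemma: quickselect computes the k-th element of the sorted list
theorem pvKth_eq_sorted : ∀ (n : Nat) (xs : List String) (k : Int), xs.length = n → 0 ≤ k →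
    k < (xs.length : Int) →
    pvKth xs k = PySem.List.pyGetD (PySem.List.sorted xs (fun x => x) false) k "" := by
  intro n
  induction n using Nat.strong_induction_on with
  | _ n ih =>
    intro xs k hn h0 hk
    cases xs with
    | nil => simp at hk; omega
    | cons p rest =>
      simp only [List.length_cons] at hn hk
      simp only [pvKth]
      set L := (p :: rest).filter (fun x => decide (x < p)) with hL
      set E := (p :: rest).filter (fun x => x == p) with hE
      set G := (p :: rest).filter (fun x => decide (p < x)) with hG
      have hperm : (L ++ E ++ G).Perm (p :: rest) := pv_tri_perm _ p
      have hlenLEG : L.length + E.length + G.length = rest.length + 1 := by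
        have := hperm.length_eq
        simp only [List.length_append, List.length_cons] at this
        omega
      have hLr : L.length ≤ rest.length := by
        rw [hL, List.filter_cons]
        simp only [lt_irrefl, decide_false, Bool.false_eq_true, if_false]
        exact List.length_filter_le _ _
      have hGr : G.length ≤ rest.length := by
        rw [hG, List.filter_cons]
        simp only [lt_irrefl, decide_false, Bool.false_eq_true, if_false]
        exact List.length_filter_le _ _
      have hLm : ∀ x ∈ L, x < p := by
        intro x hx; rw [hL] at hx
        simp only [List.mem_filter, decide_eq_true_eq] at hx; exact hx.2
      have hEm : ∀ x ∈ E, x = p := by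
        intro x hx; rw [hE] at hx
        simp only [List.mem_filter, beq_iff_eq] at hx; exact hx.2
      have hGm : ∀ x ∈ G, p < x := by
        intro x hx; rw [hG] at hx
        simp only [List.mem_filter, decide_eq_true_eq] at hx; exact hx.2
      set SL := PySem.List.sorted L (fun x => x) false with hSL
      set SG := PySem.List.sorted G (fun x => x) false with hSG
      have hSLp : SL.Perm L := PySem.List.sorted_perm L (fun x => x) false
      have hSGp : SG.Perm G := PySem.List.sorted_perm G (fun x => x) false
      have hSLlen : SL.length = L.length := hSLp.length_eq
      have hSGlen : SG.length = G.length := hSGp.length_eq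
      have hkey : PySem.List.sorted (p :: rest) (fun x => x) false = SL ++ E ++ SG := by
        apply PySem.List.sorted_id_eq_of_perm_of_pairwise
        · exact (((hSLp.append (List.Perm.refl E)).append hSGp)).trans hperm
        · rw [List.append_assoc]
          rw [List.pairwise_append]
          refine ⟨by simpa using PySem.List.sorted_pairwise L (fun x => x), ?_, ?_⟩
          · rw [List.pairwise_append]
            refine ⟨?_, by simpa using PySem.List.sorted_pairwise G (fun x => x), ?_⟩
            · exact List.pairwise_of_forall_mem_list (fun a ha b hb => by
                rw [hEm a ha, hEm b hb])
            · intro a ha b hb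
              rw [hEm a ha]
              exact le_of_lt (hGm b (hSGp.mem_iff.mp hb))
          · intro a ha b hb
            have hap : a < p := hLm a (hSLp.mem_iff.mp ha)
            rcases List.mem_append.mp hb with hbE | hbG
            · rw [hEm b hbE]; exact le_of_lt hap
            · exact le_of_lt (lt_trans hap (hGm b (hSGp.mem_iff.mp hbG)))
      rw [hkey]
      split_ifs with h1 h2
      · -- k < |L| : recurse left
        rw [ih L.length (by omega) L k rfl h0 (by exact_mod_cast h1)]
        rw [← hSL]
        rw [PySem.List.pyGetD_eq_getElem SL "" h0 (by push_cast [hSLlen]; omega),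
            PySem.List.pyGetD_eq_getElem (SL ++ E ++ SG) "" h0
              (by simp only [List.length_append, hSLlen, hSGlen]; push_cast; omega)]
        rw [List.getElem_append_left (show k.toNat < (SL ++ E).length by
              simp only [List.length_append, hSLlen]; omega),
            List.getElem_append_left (by omega)]
      · -- middle segment: the answer is the pivot
        simp only [List.length_cons] at h2
        push_cast at h2
        rw [PySem.List.pyGetD_eq_getElem (SL ++ E ++ SG) "" h0
              (by simp only [List.length_append, hSLlen, hSGlen]; push_cast; omega)]
        rw [List.getElem_append_left (show k.toNat < (SL ++ E).length by
              simp only [List.length_append, hSLlen]; omega),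
            List.getElem_append_right (by omega)]
        exact (hEm _ (List.getElem_mem _)).symm
      · -- right segment: recurse right
        simp only [List.length_cons] at h1 h2
        push_cast at h1 h2
        have hkG : 0 ≤ k - ((rest.length + 1 : Int) - G.length) := by omega
        have hkG2 : k - ((rest.length + 1 : Int) - G.length) < (G.length : Int) := by omega
        have harg : k - ((((p :: rest).length : Nat) : Int) - (G.length : Int))
            = k - ((rest.length + 1 : Int) - G.length) := by
          simp only [List.length_cons]; push_cast; ring
        rw [harg, ih G.length (by omega) G _ rfl hkG hkG2]
        rw [← hSG]
        rw [PySem.List.pyGetD_eq_getElem SG "" hkG (by push_cast [hSGlen]; omega),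
            PySem.List.pyGetD_eq_getElem (SL ++ E ++ SG) "" h0
              (by simp only [List.length_append, hSLlen, hSGlen]; push_cast; omega)]
        rw [List.getElem_append_right (by simp only [List.length_append, hSLlen]; omega)]
        congr 1
        simp only [List.length_append, hSLlen]
        omega

-- ===== VERDICT (by name: the statement is the Claim_ definition above) =====
theorem choose_four_views_spec : Claim_equal_choose_four_views := by
  intro img_paths _ hpre
  unfold Spec_choose_four_views choose_four_views choose_four_views_alt
  simp only [PySem.List.len_eq, List.map_cons, List.map_nil]
  set s := PySem.List.sorted img_paths (fun x => x) false with hs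
  have hslen : s.length = img_paths.length := (PySem.List.sorted_perm _ _ _).length_eq
  have hlen : 1 ≤ img_paths.length := List.length_pos_of_ne_nil hpre
  rw [hslen]
  set n : Int := (img_paths.length : Int) with hn
  have hn1 : 1 ≤ n := by rw [hn]; exact_mod_cast hlen
  have h4 : PySem.Int.floordiv n 4 = n / 4 := PySem.Int.floordiv_eq_ediv_of_pos (by omega)
  have h2 : PySem.Int.floordiv n 2 = n / 2 := PySem.Int.floordiv_eq_ediv_of_pos (by omega)
  rw [h4, h2]
  have m0 : min (0 : Int) (n - 1) = 0 := by omega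
  have m4 : min (n / 4) (n - 1) = n / 4 := by omega
  have m2 : min (n / 2) (n - 1) = n / 2 := by omega
  have ml : min (n - 2) (n - 1) = n - 2 := by omega
  rw [m0, m4, m2, ml]
  rw [pvPadA]
  simp only [List.length_cons, List.length_nil]
  rw [if_neg (by omega)]
  have hK : ∀ (k : Int), 0 ≤ k → k < n →
      pvKth img_paths k = PySem.List.pyGetD s k "" := by
    intro k hk0 hkn
    rw [hs]
    refine pvKth_eq_sorted img_paths.length img_paths k rfl hk0 ?_
    rw [hn] at hkn; exact hkn
  have x0 : max (0 : Int) 0 = 0 := by omega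
  have x4 : max (0 : Int) (n / 4) = n / 4 := by omega
  have x2 : max (0 : Int) (n / 2) = n / 2 := by omega
  rw [x0, x4, x2]
  rw [hK 0 (by omega) (by omega), hK (n / 4) (by omega) (by omega),
      hK (n / 2) (by omega) (by omega)]
  rcases lt_or_ge n 2 with hsm | hbig
  · -- n = 1 : A reads index -1, B clamps to 0; both give the single element
    have hne : s ≠ [] := by
      rw [hs]; simpa [PySem.List.sorted_eq_nil_iff] using hpre
    have hm : max (0 : Int) (n - 2) = 0 := by omega
    have hadj : n - 2 = -1 := by omega
    rw [hm, hK 0 (by omega) (by omega), hadj]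
    rw [PySem.List.pyGetD_neg_one s "" hne, List.getLast_eq_getElem,
        PySem.List.pyGetD_eq_getElem s "" (by omega) (by rw [hslen]; omega)]
    have hidx : s.length - 1 = (0 : Int).toNat := by
      rw [hslen]; omega
    simp only [hidx]
  · have hm : max (0 : Int) (n - 2) = n - 2 := by omega
    rw [hm, hK (n - 2) (by omega) (by omega)]
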